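-- pv_equiv track=rewrite | github.com/montreal91/workshop | ap/codeforces/cf699/solution_c.py | get_painting
-- ===== SOURCE A (Python) =====
-- def get_painting(A, B, C):
--     result = [-1 for _ in enumerate(C)]
--
--     painters = {}
--     for i, ci in enumerate(C):
--         if ci in painters:
--             painters[ci].append(i)
--         else:
--             painters[ci] = [i]
--
--     for i, _ in enumerate(A):
--         if A[i] == B[i]:
--             continue
--         else:
--             # look for available painter
--             if B[i] not in painters:
--                 # No suitable painter available
--                 result[0] = -1
--                 return result
--             ci = painters[B[i]].pop()
--             result[ci] = i + 1
--             if len(painters[B[i]]) == 0: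
--                 painters.pop(B[i])
--
--     # If algorithm reached this point all boards are properly painted.
--     # We should find proper jobs for remaining painters
--
--     boards = {}
--     for i, bi in enumerate(B):
--         boards[bi] = i
--
--     painted = [False for _ in enumerate(A)]
--     for i, _ in enumerate(C):
--         ind = len(C) - i - 1
--         if result[ind] > 0:
--             painted[result[ind] - 1] = True
--             continue
--         # Try to find board wiht same colour
--         if C[ind] in boards:
--             painted[boards[C[ind]]] = True
--             result[ind] = boards[C[ind]] + 1
--             continue
--
--         # Try to find board which will be painted later
--         found = False
--         for j, _ in enumerate(painted):
--             if painted[j]: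
--                 result[ind] = j + 1
--                 found = True
--                 break
--         if not found:
--             result[ind] = -1
--             return result
--     return result
-- ===== SOURCE B (Python) =====
-- def get_painting(A, B, C):
--     m = len(C)
--     result = [-1] * m
--
--     # positions of each color in C, kept intact; consumption counters replace pops
--     pos = {}
--     for p, c in enumerate(C):
--         pos.setdefault(c, []).append(p)
--     used = {}
--
--     for i in range(len(A)):
--         if A[i] == B[i]:
--             continue
--         lst = pos.get(B[i], [])
--         k = used.get(B[i], 0)
--         if k == len(lst):
--             result[0] = -1
--             return result
--         result[lst[len(lst) - 1 - k]] = i + 1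
--         used[B[i]] = k + 1
--
--     # last board of each desired color
--     last = {}
--     for i, b in enumerate(B):
--         last[b] = i
--
--     # the board each painter certainly paints (None = painter still unplaced)
--     anchors = []
--     for r, c in zip(result, C):
--         if r > 0:
--             anchors.append(r - 1)
--         elif c in last:
--             anchors.append(last[c])
--         else:
--             anchors.append(None)
--
--     # right-to-left: a running minimum anchored board replaces A's rescan of painted[]
--     out_rev = []
--     mp = None
--     for ind in range(m - 1, -1, -1):
--         a = anchors[ind]
--         if a is not None:
--             out_rev.append(result[ind] if result[ind] > 0 else a + 1)
--             if mp is None or a < mp: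
--                 mp = a
--         elif mp is not None:
--             out_rev.append(mp + 1)
--         else:
--             return result[:ind] + [-1] + out_rev[::-1]
--     return out_rev[::-1]
-- ===== Notes on version B (the rewrite author's own statement) =====
-- stated objective: alternative
-- what changed: Phase 1 replaces A's pop-and-delete painter stacks by consumption counters over per-color position lists built once; phase 2 replaces A's in-place result mutation with a painted[] array rescanned for each unplaced painter by a staged anchors list, a running minimum anchored board and back-to-front construction of the output.
import Mathlib
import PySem

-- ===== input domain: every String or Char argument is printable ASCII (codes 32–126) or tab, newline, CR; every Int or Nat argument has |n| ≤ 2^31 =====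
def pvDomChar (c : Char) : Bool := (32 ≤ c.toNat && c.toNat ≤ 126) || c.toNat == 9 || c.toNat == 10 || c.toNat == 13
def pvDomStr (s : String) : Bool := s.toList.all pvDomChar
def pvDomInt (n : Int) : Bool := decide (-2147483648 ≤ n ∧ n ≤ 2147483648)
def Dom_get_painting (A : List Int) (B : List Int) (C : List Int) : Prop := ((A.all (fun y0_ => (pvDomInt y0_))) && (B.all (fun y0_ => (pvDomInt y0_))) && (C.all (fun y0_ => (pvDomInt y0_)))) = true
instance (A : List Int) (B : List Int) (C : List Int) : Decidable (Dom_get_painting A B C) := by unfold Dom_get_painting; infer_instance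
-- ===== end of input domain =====

-- B replaces A's pop-and-delete painter bookkeeping by consumption counters over fixed
-- per-color position lists, and A's phase-2 in-place writes with a rescan of painted[] by a
-- staged anchors list, a running minimum and back-to-front construction of the output
-- (alternative decomposition; not claimed faster).

-- ===== PORT A =====

-- painters = {}; for i, ci in enumerate(C): append i to painters[ci] (or create [i])
def pvBuildPaintersA (idxs : List Nat) (C : List Int) (d : PySem.Dict Int (List Nat)) : PySem.Dict Int (List Nat) :=
  match idxs with
  | [] => d
  | i :: rest =>
      -- 'if ci in painters: painters[ci].append(i) else painters[ci] = [i]'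
      pvBuildPaintersA rest C
        (match d.get? (C.getD i 0) with      -- i < len C; getD in range
         | some l => d.insert (C.getD i 0) (l ++ [i])
         | none   => d.insert (C.getD i 0) [i])

-- boards = {}; for i, bi in enumerate(B): boards[bi] = i
def pvBuildBoards (idxs : List Nat) (B : List Int) (d : PySem.Dict Int Nat) : PySem.Dict Int Nat :=
  match idxs with
  | [] => d
  | i :: rest => pvBuildBoards rest B (d.insert (B.getD i 0) i)

-- 'for j, _ in enumerate(painted): if painted[j]: ... break' — index of the first True
def pvFindFirstTrue (l : List Bool) : Option Nat :=
  match l with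
  | [] => none
  | b :: rest => if b then some 0 else (pvFindFirstTrue rest).map (· + 1)

-- 'for i, _ in enumerate(A): ...' of A; returns (result, early_return?)
def pvPaintLoopA (idxs : List Nat) (A B : List Int) (painters : PySem.Dict Int (List Nat)) (result : List Int) : List Int × Bool :=
  match idxs with
  | [] => (result, false)
  | i :: rest =>
    if A.getD i 0 = B.getD i 0 then pvPaintLoopA rest A B painters result   -- i < len A = len B on Pre_: getD in range
    else
      match painters.get? (B.getD i 0) with
      | none => (result.set 0 (-1), true)                                   -- 'result[0] = -1; return result'
      | some l =>
          -- ci = painters[B[i]].pop(); values in the dict are never [] so getLast?.getD is the popped element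
          let ci := l.getLast?.getD 0
          let result' := result.set ci ((i : Int) + 1)
          let painters' := if l.dropLast.isEmpty then painters.erase (B.getD i 0)
                           else painters.insert (B.getD i 0) l.dropLast
          pvPaintLoopA rest A B painters' result'

-- 'for i, _ in enumerate(C): ind = len(C) - i - 1 ...' — inds is the descending list of indices
def pvRepaintLoopA (inds : List Nat) (C : List Int) (boards : PySem.Dict Int Nat) (result : List Int) (painted : List Bool) : List Int :=
  match inds with
  | [] => result
  | ind :: rest =>
    let r := result.getD ind 0
    if 0 < r then pvRepaintLoopA rest C boards result (painted.set (r - 1).toNat true)   -- r > 0 so toNat exact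
    else
      match boards.get? (C.getD ind 0) with
      | some j => pvRepaintLoopA rest C boards (result.set ind ((j : Int) + 1)) (painted.set j true)
      | none =>
        match pvFindFirstTrue painted with
        | some j => pvRepaintLoopA rest C boards (result.set ind ((j : Int) + 1)) painted
        | none => result.set ind (-1)                                        -- 'result[ind] = -1; return result'

def get_painting (A : List Int) (B : List Int) (C : List Int) : List Int :=
  let result := List.replicate C.length (-1)
  let painters := pvBuildPaintersA (List.range C.length) C PySem.Dict.empty
  match pvPaintLoopA (List.range A.length) A B painters result with
  | (result, true) => result
  | (result, false) =>
      let boards := pvBuildBoards (List.range B.length) B PySem.Dict.empty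
      let painted := List.replicate A.length false
      pvRepaintLoopA (List.range C.length).reverse C boards result painted

-- ===== PORT B =====

-- 'for p, c in enumerate(C): pos.setdefault(c, []).append(p)' — walks the list with a counter
def pvPosB (cs : List Int) (p : Nat) (d : PySem.Dict Int (List Nat)) : PySem.Dict Int (List Nat) :=
  match cs with
  | [] => d
  | c :: rest => pvPosB rest (p + 1) (d.insert c ((d.get? c).getD [] ++ [p]))

-- phase 1 of B: consumption counters 'used' over the fixed position lists 'pos'
def pvAssignB (idxs : List Nat) (A B : List Int) (pos : PySem.Dict Int (List Nat)) (used : PySem.Dict Int Nat) (result : List Int) : List Int × Bool :=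
  match idxs with
  | [] => (result, false)
  | i :: rest =>
    if A.getD i 0 = B.getD i 0 then pvAssignB rest A B pos used result
    else
      let lst := (pos.get? (B.getD i 0)).getD []
      let k := (used.get? (B.getD i 0)).getD 0
      if k = lst.length then (result.set 0 (-1), true)
      else
        pvAssignB rest A B pos (used.insert (B.getD i 0) (k + 1))
          (result.set (lst.getD (lst.length - 1 - k) 0) ((i : Int) + 1))

-- 'for i, b in enumerate(B): last[b] = i'
def pvLastB (bs : List Int) (i : Nat) (d : PySem.Dict Int Nat) : PySem.Dict Int Nat :=
  match bs with
  | [] => d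
  | b :: rest => pvLastB rest (i + 1) (d.insert b i)

-- 'for r, c in zip(result, C): ...' — the board each painter certainly paints
def pvAnchorsB (rcs : List (Int × Int)) (last : PySem.Dict Int Nat) : List (Option Int) :=
  match rcs with
  | [] => []
  | (r, c) :: rest =>
      (if 0 < r then some (r - 1)
       else match last.get? c with
            | some j => some ((j : Int))
            | none => none) :: pvAnchorsB rest last

-- 'for ind in range(m-1,-1,-1): ...' of B; out is the processed suffix (Python's out_rev,
-- kept already reversed: consing here = append-then-final-[::-1] there), mp the running minimum
def pvFillB (inds : List Nat) (anchors : List (Option Int)) (result : List Int) (out : List Int) (mp : Option Int) : List Int :=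
  match inds with
  | [] => out
  | ind :: rest =>
    match anchors.getD ind none with
    | some a =>
        pvFillB rest anchors result
          ((if 0 < result.getD ind 0 then result.getD ind 0 else a + 1) :: out)
          (match mp with
           | none => some a
           | some v => if a < v then some a else some v)
    | none =>
      match mp with
      | some v => pvFillB rest anchors result ((v + 1) :: out) mp
      | none => result.take ind ++ [-1] ++ out     -- 'result[:ind] + [-1] + out_rev[::-1]' ([:ind], ind ≥ 0: take is exact)

def get_painting_alt (A : List Int) (B : List Int) (C : List Int) : List Int :=
  let result := List.replicate C.length (-1)
  let pos := pvPosB C 0 PySem.Dict.empty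
  match pvAssignB (List.range A.length) A B pos PySem.Dict.empty result with
  | (result, true) => result
  | (result, false) =>
      let last := pvLastB B 0 PySem.Dict.empty
      let anchors := pvAnchorsB (result.zip C) last
      pvFillB (List.range C.length).reverse anchors result [] none

-- ===== PRECONDITION & SPEC =====

-- positions of colour c in C (ascending)
def pvPosL (C : List Int) (c : Int) : List Nat :=
  (List.range C.length).filter (fun p => C.getD p 0 == c)

-- number of mismatched boards of desired colour c among the first k boards
def pvDem (A B : List Int) (c : Int) (k : Nat) : Nat :=
  ((List.range k).filter (fun j => !(A.getD j 0 == B.getD j 0) && (B.getD j 0 == c))).length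

-- number of earlier painters of painter ind's colour
def pvRank (C : List Int) (ind : Nat) : Nat :=
  ((List.range ind).filter (fun p => C.getD p 0 == C.getD ind 0)).length

-- phase 1 stops early: some mismatched board's desired colour runs out of painters
def pvEarly (A B C : List Int) : Prop :=
  ∃ i ∈ List.range (min A.length B.length),
    A.getD i 0 ≠ B.getD i 0 ∧ (pvPosL C (B.getD i 0)).length < pvDem A B (B.getD i 0) (i + 1)

-- painter ind gets a board in phase 1 (phase 1 consumes, per colour, the painters of highest rank)
def pvUsedP (A B C : List Int) (ind : Nat) : Prop :=
  (pvPosL C (C.getD ind 0)).length - pvDem A B (C.getD ind 0) A.length ≤ pvRank C ind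

-- painter ind is unused after phase 1 and the last board of its colour lies beyond A:
-- phase 2 would execute painted[j] with j ≥ len(A)
def pvBad (A B C : List Int) (ind : Nat) : Prop :=
  ¬ pvUsedP A B C ind ∧
  ∃ j ∈ List.range B.length, A.length ≤ j ∧ B.getD j 0 = C.getD ind 0 ∧
    ∀ j' ∈ List.range B.length, j < j' → B.getD j' 0 ≠ C.getD ind 0

-- Pre_ excludes EXACTLY the inputs on which Python A raises (always IndexError): (i) A longer
-- than B without an early no-painter return, so the loop reads B[i] past its end; (ii) C = []
-- with a mismatched board, where 'result[0] = -1' indexes the empty list; (iii) phase 2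
-- executing painted[j] for a board j ≥ len(A): an unused painter whose colour's last board in B
-- lies beyond A, reached because the last painter is anchored.  No input A returns on is excluded.
def Pre_get_painting (A : List Int) (B : List Int) (C : List Int) : Prop :=
  ¬ ((B.length < A.length ∧ ¬ pvEarly A B C) ∨
     (C = [] ∧ ∃ i ∈ List.range (min A.length B.length), A.getD i 0 ≠ B.getD i 0) ∨
     (A.length ≤ B.length ∧ ¬ pvEarly A B C ∧ C ≠ [] ∧
      (pvUsedP A B C (C.length - 1) ∨
       ∃ j ∈ List.range B.length, B.getD j 0 = C.getD (C.length - 1) 0) ∧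
      ∃ ind ∈ List.range C.length, pvBad A B C ind))
instance (A : List Int) (B : List Int) (C : List Int) : Decidable (Pre_get_painting A B C) := by
  unfold Pre_get_painting pvBad pvEarly pvUsedP; infer_instance

def pvWitness_get_painting : List Int × List Int × List Int := ([1], [2], [2])

def Spec_get_painting (A : List Int) (B : List Int) (C : List Int) (out : List Int) : Prop := out = get_painting_alt A B C
instance (A : List Int) (B : List Int) (C : List Int) (out : List Int) : Decidable (Spec_get_painting A B C out) := by unfold Spec_get_painting; infer_instance

-- ===== CLAIM (what is proved, stated in full; the proofs are below) =====
def Claim_equal_get_painting : Prop := ∀ (A : List Int) (B : List Int) (C : List Int), Dom_get_painting A B C → Pre_get_painting A B C → Spec_get_painting A B C (get_painting A B C)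

-- ===== LEMMAS AND PROOFS =====

theorem get_painting_witness_ok :
    Dom_get_painting pvWitness_get_painting.1 pvWitness_get_painting.2.1 pvWitness_get_painting.2.2 ∧
    Pre_get_painting pvWitness_get_painting.1 pvWitness_get_painting.2.1 pvWitness_get_painting.2.2 := by
  decide


-- ---------- proof-only helpers ----------

def pvListOpt (l : List Nat) : Option (List Nat) := if l.isEmpty then none else some l

def pvNoEarly (A B C : List Int) (k : Nat) : Prop :=
  ∀ j, j < k → A.getD j 0 ≠ B.getD j 0 →
    pvDem A B (B.getD j 0) (j + 1) ≤ (pvPosL C (B.getD j 0)).length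

def pvSignOK (A B C : List Int) (result : List Int) (k : Nat) : Prop :=
  ∀ ind, ind < C.length →
    (0 < result.getD ind 0 ↔
      (pvPosL C (C.getD ind 0)).length - pvDem A B (C.getD ind 0) k ≤ pvRank C ind)

def pvBoundOK (A : List Int) (result : List Int) : Prop :=
  ∀ ind, ind < result.length → 0 < result.getD ind 0 → result.getD ind 0 ≤ (A.length : Int)

def pvLastIdx (B : List Int) (c : Int) : Option Nat :=
  ((List.range B.length).filter (fun j => B.getD j 0 == c)).getLast?

def pvMinUpd (mp : Option Nat) (j : Nat) : Option Nat :=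
  match mp with
  | none => some j
  | some k => if j < k then some j else some k

-- ---------- list-getD utilities ----------

theorem pvGetD_set_self (l : List Int) (i : Nat) (v : Int) (h : i < l.length) :
    (l.set i v).getD i 0 = v := by
  rw [List.getD_eq_getElem?_getD, List.getElem?_set_self h]; rfl

theorem pvGetD_set_ne (l : List Int) (i j : Nat) (v : Int) (h : i ≠ j) :
    (l.set i v).getD j 0 = l.getD j 0 := by
  rw [List.getD_eq_getElem?_getD, List.getElem?_set_ne h, ← List.getD_eq_getElem?_getD]

theorem pvTake_succ_concat (l : List Int) (k : Nat) (h : k < l.length) :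
    l.take (k + 1) = l.take k ++ [l.getD k 0] := by
  rw [List.take_add_one, List.getElem?_eq_getElem h,
    List.getD_eq_getElem?_getD, List.getElem?_eq_getElem h]
  rfl

theorem pvSet_boundary (l : List Int) (out : List Int) (k : Nat) (v : Int) (h : k < l.length) :
    (l.take (k + 1) ++ out).set k v = l.take k ++ v :: out := by
  rw [pvTake_succ_concat l k h, List.append_assoc,
    List.set_append_right _ _ (by rw [List.length_take]; omega)]
  have h0 : k - (l.take k).length = 0 := by rw [List.length_take]; omega
  rw [h0]
  rfl

theorem pvGetD_take_append (l out : List Int) (k ind : Nat) (hik : ind < k) (h : k ≤ l.length) :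
    (l.take k ++ out).getD ind 0 = l.getD ind 0 := by
  rw [List.getD_eq_getElem?_getD, List.getElem?_append,
    if_pos (by simp [List.length_take]; omega), List.getElem?_take, if_pos hik,
    ← List.getD_eq_getElem?_getD]

-- ---------- filter-over-range utilities ----------

theorem pvFilter_range_succ_pos (C : List Int) (c : Int) (k : Nat) (h : C.getD k 0 = c) :
    (List.range (k + 1)).filter (fun p => C.getD p 0 == c)
      = (List.range k).filter (fun p => C.getD p 0 == c) ++ [k] := by
  rw [List.range_succ, List.filter_append, List.filter_singleton]
  have hb : (C.getD k 0 == c) = true := by rw [beq_iff_eq]; exact h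
  rw [hb]
  rfl

theorem pvFilter_range_succ_neg (C : List Int) (c : Int) (k : Nat) (h : C.getD k 0 ≠ c) :
    (List.range (k + 1)).filter (fun p => C.getD p 0 == c)
      = (List.range k).filter (fun p => C.getD p 0 == c) := by
  rw [List.range_succ, List.filter_append, List.filter_singleton]
  have hb : (C.getD k 0 == c) = false := by rw [beq_eq_false_iff_ne]; exact h
  rw [hb]
  simp

-- ---------- Dict utilities ----------

theorem pvFind?_filter_ne {ν : Type} (k k' : Int) (items : List (Int × ν)) :
    (items.filter (fun p => !(p.1 == k))).find? (fun p => p.1 == k')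
      = if k' = k then none else items.find? (fun p => p.1 == k') := by
  induction items with
  | nil => split <;> rfl
  | cons p rest ih =>
      by_cases hpk : p.1 = k
      · rw [List.filter_cons_of_neg (by simp [hpk])]
        rw [ih]
        by_cases hk : k' = k
        · simp [hk]
        · rw [if_neg hk, if_neg hk,
            List.find?_cons_of_neg (by simp only [beq_iff_eq, hpk]; exact fun h => hk h.symm)]
      · rw [List.filter_cons_of_pos (by simp [hpk])]
        by_cases hpk' : p.1 = k'
        · have hk : ¬ (k' = k) := fun h => hpk (by rw [hpk', h])
          rw [List.find?_cons_of_pos (by simp [hpk']), if_neg hk,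
            List.find?_cons_of_pos (by simp [hpk'])]
        · rw [List.find?_cons_of_neg (by simp [hpk']), ih]
          by_cases hk : k' = k
          · simp [hk]
          · rw [if_neg hk, if_neg hk, List.find?_cons_of_neg (by simp [hpk'])]

theorem pvGet?_erase {ν : Type} (d : PySem.Dict Int ν) (k k' : Int) :
    (d.erase k).get? k' = if k' = k then none else d.get? k' := by
  cases d with
  | mk items =>
      simp only [PySem.Dict.erase, PySem.Dict.get?, pvFind?_filter_ne]
      split <;> rfl

-- ---------- pvPosL facts ----------

theorem pvRange_decomp (m ind : Nat) (h : ind < m) :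
    List.range m = List.range ind ++ ind :: (List.range (m - ind - 1)).map (fun x => ind + 1 + x) := by
  have hm : m = (ind + 1) + (m - ind - 1) := by omega
  calc List.range m = List.range ((ind + 1) + (m - ind - 1)) := by rw [← hm]
    _ = List.range (ind + 1) ++ (List.range (m - ind - 1)).map (fun x => (ind + 1) + x) :=
        List.range_add
    _ = _ := by rw [List.range_succ, List.append_assoc]; rfl

theorem pvPosL_decomp (C : List Int) (ind : Nat) (h : ind < C.length) :
    pvPosL C (C.getD ind 0) =
      (List.range ind).filter (fun p => C.getD p 0 == C.getD ind 0) ++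
        ind :: ((List.range (C.length - ind - 1)).map (fun x => ind + 1 + x)).filter
          (fun p => C.getD p 0 == C.getD ind 0) := by
  unfold pvPosL
  rw [pvRange_decomp C.length ind h, List.filter_append, List.filter_cons]
  simp

theorem pvRank_lt (C : List Int) (ind : Nat) (h : ind < C.length) :
    pvRank C ind < (pvPosL C (C.getD ind 0)).length := by
  rw [pvPosL_decomp C ind h]
  simp only [List.length_append, List.length_cons]
  unfold pvRank
  omega

theorem pvPosL_getD_rank (C : List Int) (ind : Nat) (h : ind < C.length) :
    (pvPosL C (C.getD ind 0)).getD (pvRank C ind) 0 = ind := by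
  rw [pvPosL_decomp C ind h, List.getD_eq_getElem?_getD, List.getElem?_append]
  rw [if_neg (by unfold pvRank; omega)]
  have h0 : pvRank C ind - ((List.range ind).filter (fun p => C.getD p 0 == C.getD ind 0)).length = 0 := by
    unfold pvRank; omega
  rw [h0]
  rfl

theorem pvPosL_mem (C : List Int) (c : Int) (p : Nat) :
    p ∈ pvPosL C c ↔ p < C.length ∧ C.getD p 0 = c := by
  simp [pvPosL, List.mem_filter, List.mem_range]

theorem pvPosL_nodup (C : List Int) (c : Int) : (pvPosL C c).Nodup := by
  have h := (List.pairwise_lt_range (n := C.length)).filter (fun p => C.getD p 0 == c)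
  exact h.imp (fun hlt => Nat.ne_of_lt hlt)

theorem pvPosL_rank_getD (C : List Int) (c : Int) (t : Nat) (h : t < (pvPosL C c).length) :
    pvRank C ((pvPosL C c).getD t 0) = t ∧ C.getD ((pvPosL C c).getD t 0) 0 = c ∧
      (pvPosL C c).getD t 0 < C.length := by
  have hq : (pvPosL C c).getD t 0 = (pvPosL C c)[t] := by
    rw [List.getD_eq_getElem?_getD, List.getElem?_eq_getElem h]; rfl
  have hmem : (pvPosL C c)[t] ∈ pvPosL C c := List.getElem_mem h
  obtain ⟨hqm, hqc⟩ := (pvPosL_mem C c _).mp hmem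
  refine ⟨?_, by rw [hq]; exact hqc, by rw [hq]; exact hqm⟩
  have h1 : (pvPosL C (C.getD ((pvPosL C c)[t]) 0)).getD (pvRank C ((pvPosL C c)[t])) 0
      = (pvPosL C c)[t] := pvPosL_getD_rank C _ hqm
  rw [hqc] at h1
  have hrlt : pvRank C ((pvPosL C c)[t]) < (pvPosL C c).length := by
    have h2 := pvRank_lt C ((pvPosL C c)[t]) hqm
    rwa [hqc] at h2
  have h2 : (pvPosL C c)[pvRank C ((pvPosL C c)[t])] = (pvPosL C c)[t] := by
    rw [List.getD_eq_getElem?_getD, List.getElem?_eq_getElem hrlt] at h1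
    simpa using h1
  have h3 := ((pvPosL_nodup C c).getElem_inj_iff (hi := hrlt) (hj := h)).mp h2
  rw [hq]; exact h3

-- ---------- pvDem facts ----------

theorem pvDem_succ_pos (A B : List Int) (c : Int) (k : Nat)
    (h1 : A.getD k 0 ≠ B.getD k 0) (h2 : B.getD k 0 = c) :
    pvDem A B c (k + 1) = pvDem A B c k + 1 := by
  unfold pvDem
  rw [List.range_succ, List.filter_append, List.filter_singleton]
  have hb : (!(A.getD k 0 == B.getD k 0) && (B.getD k 0 == c)) = true := by
    rw [Bool.and_eq_true, Bool.not_eq_eq_eq_not]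
    exact ⟨by rw [Bool.not_true, beq_eq_false_iff_ne]; exact h1, by rw [beq_iff_eq]; exact h2⟩
  rw [hb]
  simp

theorem pvDem_succ_neg (A B : List Int) (c : Int) (k : Nat)
    (h : A.getD k 0 = B.getD k 0 ∨ B.getD k 0 ≠ c) :
    pvDem A B c (k + 1) = pvDem A B c k := by
  unfold pvDem
  rw [List.range_succ, List.filter_append, List.filter_singleton]
  have hb : (!(A.getD k 0 == B.getD k 0) && (B.getD k 0 == c)) = false := by
    rcases h with h | h
    · have : (A.getD k 0 == B.getD k 0) = true := by rw [beq_iff_eq]; exact h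
      rw [this]
      rfl
    · have : (B.getD k 0 == c) = false := by rw [beq_eq_false_iff_ne]; exact h
      rw [this, Bool.and_false]
  rw [hb]
  simp

theorem pvDem_le (A B C : List Int) (k : Nat) (h : pvNoEarly A B C k) (c : Int) :
    pvDem A B c k ≤ (pvPosL C c).length := by
  induction k with
  | zero => simp [pvDem]
  | succ k ih =>
      have hk : pvNoEarly A B C k := fun j hj => h j (by omega)
      by_cases h1 : A.getD k 0 = B.getD k 0
      · rw [pvDem_succ_neg A B c k (Or.inl h1)]
        exact ih hk
      · by_cases h2 : B.getD k 0 = c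
        · rw [pvDem_succ_pos A B c k h1 h2]
          have h3 := h k (by omega) h1
          rw [h2] at h3
          rw [pvDem_succ_pos A B c k h1 h2] at h3
          omega
        · rw [pvDem_succ_neg A B c k (Or.inr h2)]
          exact ih hk

-- ---------- build specs ----------

theorem pvBuildA_step (C : List Int) (k : Nat) (d : PySem.Dict Int (List Nat))
    (hd : ∀ c, d.get? c = pvListOpt ((List.range k).filter (fun p => C.getD p 0 == c))) :
    ∀ c, (match d.get? (C.getD k 0) with
      | some l => d.insert (C.getD k 0) (l ++ [k])
      | none   => d.insert (C.getD k 0) [k]).get? c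
        = pvListOpt ((List.range (k + 1)).filter (fun p => C.getD p 0 == c)) := by
  intro c
  by_cases hc : c = C.getD k 0
  · rw [pvFilter_range_succ_pos C c k hc.symm]
    have hself := hd (C.getD k 0)
    cases hget : d.get? (C.getD k 0) with
    | none =>
        rw [hget] at hself
        have hnil : (List.range k).filter (fun p => C.getD p 0 == C.getD k 0) = [] := by
          unfold pvListOpt at hself
          by_cases he : ((List.range k).filter (fun p => C.getD p 0 == C.getD k 0)).isEmpty
          · simpa using he
          · rw [if_neg he] at hself; exact absurd hself (by simp)
        show (d.insert (C.getD k 0) [k]).get? c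
          = pvListOpt ((List.range k).filter (fun p => C.getD p 0 == c) ++ [k])
        rw [PySem.Dict.get?_insert, if_pos hc, hc, hnil]
        rfl
    | some l =>
        rw [hget] at hself
        have hl : l = (List.range k).filter (fun p => C.getD p 0 == C.getD k 0) := by
          unfold pvListOpt at hself
          by_cases he : ((List.range k).filter (fun p => C.getD p 0 == C.getD k 0)).isEmpty
          · rw [if_pos he] at hself; exact absurd hself (by simp)
          · rw [if_neg he] at hself
            exact Option.some.inj hself
        show (d.insert (C.getD k 0) (l ++ [k])).get? c
          = pvListOpt ((List.range k).filter (fun p => C.getD p 0 == c) ++ [k])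
        rw [PySem.Dict.get?_insert, if_pos hc, hc, hl]
        unfold pvListOpt
        rw [if_neg (by simp)]
  · have hstep : (match d.get? (C.getD k 0) with
      | some l => d.insert (C.getD k 0) (l ++ [k])
      | none   => d.insert (C.getD k 0) [k]).get? c = d.get? c := by
      cases d.get? (C.getD k 0) with
      | none => rw [PySem.Dict.get?_insert, if_neg hc]
      | some l => rw [PySem.Dict.get?_insert, if_neg hc]
    rw [hstep, hd c, pvFilter_range_succ_neg C c k (fun h => hc h.symm)]

theorem pvBuildA_inv (C : List Int) : ∀ (len k : Nat) (d : PySem.Dict Int (List Nat)),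
    (∀ c, d.get? c = pvListOpt ((List.range k).filter (fun p => C.getD p 0 == c))) →
    ∀ c, (pvBuildPaintersA (List.range' k len) C d).get? c =
      pvListOpt ((List.range (k + len)).filter (fun p => C.getD p 0 == c)) := by
  intro len
  induction len with
  | zero => intro k d hd c; simpa using hd c
  | succ len ih =>
      intro k d hd c
      rw [List.range'_succ]
      simp only [pvBuildPaintersA]
      have h := ih (k + 1) _ (pvBuildA_step C k d hd) c
      rw [show k + (len + 1) = (k + 1) + len by omega]
      exact h

theorem pvBuildA_spec (C : List Int) (c : Int) :
    (pvBuildPaintersA (List.range C.length) C PySem.Dict.empty).get? c = pvListOpt (pvPosL C c) := by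
  rw [List.range_eq_range']
  have h := pvBuildA_inv C C.length 0 PySem.Dict.empty
    (fun c => by simp [PySem.Dict.get?_empty, pvListOpt]) c
  simpa [pvPosL] using h

theorem pvPosB_inv (C : List Int) : ∀ (cs : List Int) (k : Nat) (d : PySem.Dict Int (List Nat)),
    cs = C.drop k → k ≤ C.length →
    (∀ c, d.get? c = pvListOpt ((List.range k).filter (fun p => C.getD p 0 == c))) →
    ∀ c, (pvPosB cs k d).get? c = pvListOpt (pvPosL C c) := by
  intro cs
  induction cs with
  | nil =>
      intro k d hcs hk hd c
      have hkl : k = C.length := by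
        have := congrArg List.length hcs
        simp at this
        omega
      subst hkl
      simpa [pvPosL] using hd c
  | cons c0 rest ih =>
      intro k d hcs hk hd c
      have hklt : k < C.length := by
        have := congrArg List.length hcs
        simp at this
        omega
      have hdrop : C.drop k = C[k] :: C.drop (k + 1) := List.drop_eq_getElem_cons hklt
      rw [hdrop] at hcs
      have hc0 : c0 = C[k] := (List.cons.injEq _ _ _ _ ▸ hcs).1
      have hrest : rest = C.drop (k + 1) := (List.cons.injEq _ _ _ _ ▸ hcs).2
      have hc0' : c0 = C.getD k 0 := by
        rw [hc0, List.getD_eq_getElem?_getD, List.getElem?_eq_getElem hklt]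
        rfl
      simp only [pvPosB]
      refine ih (k + 1) _ (by rw [hrest]) (by omega) ?_ c
      intro c'
      by_cases hc : c' = c0
      · rw [hc, PySem.Dict.get?_insert, if_pos rfl]
        rw [hc0', hd (C.getD k 0)]
        rw [← hc0']
        rw [pvFilter_range_succ_pos C c0 k hc0'.symm]
        unfold pvListOpt
        by_cases he : ((List.range k).filter (fun p => C.getD p 0 == c0)).isEmpty
        · rw [if_pos he]
          have hnil : (List.range k).filter (fun p => C.getD p 0 == c0) = [] := by simpa using he
          rw [hnil]
          simp
        · rw [if_neg he, if_neg (by simp)]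
          rfl
      · rw [PySem.Dict.get?_insert, if_neg hc, hd c']
        rw [pvFilter_range_succ_neg C c' k (by rw [← hc0']; exact fun h => hc h.symm)]

theorem pvPosB_spec (C : List Int) (c : Int) :
    (pvPosB C 0 PySem.Dict.empty).get? c = pvListOpt (pvPosL C c) :=
  pvPosB_inv C C 0 PySem.Dict.empty (by simp) (by omega)
    (fun c => by simp [PySem.Dict.get?_empty, pvListOpt]) c

theorem pvPosB_getD (C : List Int) (c : Int) :
    ((pvPosB C 0 PySem.Dict.empty).get? c).getD [] = pvPosL C c := by
  rw [pvPosB_spec]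
  unfold pvListOpt
  by_cases he : (pvPosL C c).isEmpty
  · rw [if_pos he]
    simp only [Option.getD_none]
    exact (List.isEmpty_iff.mp he).symm
  · rw [if_neg he]; rfl

-- ---------- the two phase-1 loops compute the same pair ----------

theorem pvLoops_eq (A B C : List Int) :
    ∀ (idxs : List Nat) (pa pos : PySem.Dict Int (List Nat)) (used : PySem.Dict Int Nat)
      (result : List Int),
    (∀ c, (pos.get? c).getD [] = pvPosL C c) →
    (∀ c, (used.get? c).getD 0 ≤ (pvPosL C c).length) →
    (∀ c, pa.get? c = pvListOpt ((pvPosL C c).take ((pvPosL C c).length - (used.get? c).getD 0))) →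
    pvPaintLoopA idxs A B pa result = pvAssignB idxs A B pos used result := by
  intro idxs
  induction idxs with
  | nil => intros; rfl
  | cons i rest ih =>
      intro pa pos used result hpos hle hrel
      by_cases heq : A.getD i 0 = B.getD i 0
      · simp only [pvPaintLoopA, pvAssignB, if_pos heq]
        exact ih _ _ _ _ hpos hle hrel
      · have hrelc := hrel (B.getD i 0)
        have hlec := hle (B.getD i 0)
        by_cases hstop : (used.get? (B.getD i 0)).getD 0 = (pvPosL C (B.getD i 0)).length
        · have hnone : pa.get? (B.getD i 0) = none := by
            rw [hrelc, hstop]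
            unfold pvListOpt
            rw [if_pos (by simp)]
          simp only [pvPaintLoopA, pvAssignB, if_neg heq]
          rw [hnone, hpos (B.getD i 0), if_pos hstop]
        · have hlt : (used.get? (B.getD i 0)).getD 0 < (pvPosL C (B.getD i 0)).length :=
            lt_of_le_of_ne hlec hstop
          have htake_len : ((pvPosL C (B.getD i 0)).take
              ((pvPosL C (B.getD i 0)).length - (used.get? (B.getD i 0)).getD 0)).length
              = (pvPosL C (B.getD i 0)).length - (used.get? (B.getD i 0)).getD 0 := by
            simp [List.length_take]
          have htake_ne : ((pvPosL C (B.getD i 0)).take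
              ((pvPosL C (B.getD i 0)).length - (used.get? (B.getD i 0)).getD 0)).isEmpty = false := by
            rw [← Bool.not_eq_true, List.isEmpty_iff, ← List.length_eq_zero_iff, htake_len]
            omega
          have hsome : pa.get? (B.getD i 0) = some ((pvPosL C (B.getD i 0)).take
              ((pvPosL C (B.getD i 0)).length - (used.get? (B.getD i 0)).getD 0)) := by
            rw [hrelc]
            unfold pvListOpt
            rw [htake_ne]
            rfl
          have hgetlast : ((pvPosL C (B.getD i 0)).take
              ((pvPosL C (B.getD i 0)).length - (used.get? (B.getD i 0)).getD 0)).getLast?.getD 0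
              = (pvPosL C (B.getD i 0)).getD
                  ((pvPosL C (B.getD i 0)).length - 1 - (used.get? (B.getD i 0)).getD 0) 0 := by
            rw [List.getLast?_eq_getElem?, htake_len, List.getElem?_take, if_pos (by omega),
              show (pvPosL C (B.getD i 0)).length - (used.get? (B.getD i 0)).getD 0 - 1
                = (pvPosL C (B.getD i 0)).length - 1 - (used.get? (B.getD i 0)).getD 0 by omega,
              ← List.getD_eq_getElem?_getD]
          have hdrop : ((pvPosL C (B.getD i 0)).take
              ((pvPosL C (B.getD i 0)).length - (used.get? (B.getD i 0)).getD 0)).dropLast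
              = (pvPosL C (B.getD i 0)).take
                  ((pvPosL C (B.getD i 0)).length - ((used.get? (B.getD i 0)).getD 0 + 1)) := by
            rw [List.dropLast_eq_take, htake_len, List.take_take,
              show min ((pvPosL C (B.getD i 0)).length - (used.get? (B.getD i 0)).getD 0 - 1)
                  ((pvPosL C (B.getD i 0)).length - (used.get? (B.getD i 0)).getD 0)
                = (pvPosL C (B.getD i 0)).length - ((used.get? (B.getD i 0)).getD 0 + 1) by omega]
          simp only [pvPaintLoopA, pvAssignB, if_neg heq]
          rw [hsome, hpos (B.getD i 0), if_neg hstop]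
          dsimp only
          rw [hgetlast, hdrop]
          -- both sides now recurse on equal state
          apply ih
          · exact hpos
          · intro c'
            by_cases hc : c' = B.getD i 0
            · rw [hc, PySem.Dict.get?_insert, if_pos rfl, Option.getD_some]
              have hlt' := hlt
              omega
            · rw [PySem.Dict.get?_insert, if_neg hc]
              exact hle c'
          · intro c'
            by_cases hc : c' = B.getD i 0
            · rw [hc]
              have hused' : (((used.insert (B.getD i 0) ((used.get? (B.getD i 0)).getD 0 + 1)).get?
                  (B.getD i 0)).getD 0) = (used.get? (B.getD i 0)).getD 0 + 1 := by
                rw [PySem.Dict.get?_insert, if_pos rfl, Option.getD_some]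
              rw [hused']
              by_cases hde : ((pvPosL C (B.getD i 0)).take
                  ((pvPosL C (B.getD i 0)).length - ((used.get? (B.getD i 0)).getD 0 + 1))).isEmpty
              · rw [if_pos hde, pvGet?_erase, if_pos rfl]
                unfold pvListOpt
                rw [if_pos (by simpa using hde)]
              · rw [if_neg hde, PySem.Dict.get?_insert, if_pos rfl]
                unfold pvListOpt
                rw [if_neg hde]
            · have hused' : (((used.insert (B.getD i 0) ((used.get? (B.getD i 0)).getD 0 + 1)).get?
                  c').getD 0) = (used.get? c').getD 0 := by
                rw [PySem.Dict.get?_insert, if_neg hc]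
              rw [hused']
              by_cases hde : ((pvPosL C (B.getD i 0)).take
                  ((pvPosL C (B.getD i 0)).length - ((used.get? (B.getD i 0)).getD 0 + 1))).isEmpty
              · rw [if_pos hde, pvGet?_erase, if_neg hc]
                exact hrel c'
              · rw [if_neg hde, PySem.Dict.get?_insert, if_neg hc]
                exact hrel c'

-- ---------- phase-1 master invariant (on B's loop) ----------

theorem pvAssign_master (A B C : List Int) (pos : PySem.Dict Int (List Nat))
    (hpos : ∀ c, (pos.get? c).getD [] = pvPosL C c) :
    ∀ (len k : Nat) (used : PySem.Dict Int Nat) (result : List Int),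
    k + len = A.length →
    pvNoEarly A B C k →
    (∀ c, (used.get? c).getD 0 = pvDem A B c k) →
    result.length = C.length →
    pvSignOK A B C result k →
    pvBoundOK A result →
    ∀ res, pvAssignB (List.range' k len) A B pos used result = (res, false) →
      pvNoEarly A B C A.length ∧ res.length = C.length ∧
        pvSignOK A B C res A.length ∧ pvBoundOK A res := by
  intro len
  induction len with
  | zero =>
      intro k used result hk hne hused hlen hsign hbound res hres
      have hkA : k = A.length := by omega
      have hres' : result = res := by
        simpa [pvAssignB, List.range'] using hres
      subst hres'
      subst hkA
      exact ⟨hne, hlen, hsign, hbound⟩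
  | succ len ih =>
      intro k used result hk hne hused hlen hsign hbound res hres
      rw [List.range'_succ] at hres
      by_cases heq : A.getD k 0 = B.getD k 0
      · simp only [pvAssignB, if_pos heq] at hres
        refine ih (k + 1) used result (by omega) ?_ ?_ hlen ?_ hbound res hres
        · intro j hj hmis
          rcases Nat.lt_or_ge j k with hjk | hjk
          · exact hne j hjk hmis
          · have : j = k := by omega
            subst this
            exact absurd heq hmis
        · intro c
          rw [hused c, pvDem_succ_neg A B c k (Or.inl heq)]
        · intro ind hind
          rw [pvDem_succ_neg A B (C.getD ind 0) k (Or.inl heq)]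
          exact hsign ind hind
      · simp only [pvAssignB, if_neg heq] at hres
        rw [hpos (B.getD k 0), hused (B.getD k 0)] at hres
        by_cases hstop : pvDem A B (B.getD k 0) k = (pvPosL C (B.getD k 0)).length
        · rw [if_pos hstop] at hres
          exact absurd hres (by simp)
        · rw [if_neg hstop] at hres
          have hdle := pvDem_le A B C k hne (B.getD k 0)
          have hlt : pvDem A B (B.getD k 0) k < (pvPosL C (B.getD k 0)).length :=
            lt_of_le_of_ne hdle hstop
          have ht : (pvPosL C (B.getD k 0)).length - 1 - pvDem A B (B.getD k 0) k
              < (pvPosL C (B.getD k 0)).length := by omega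
          obtain ⟨hrank, hcol, hcim⟩ := pvPosL_rank_getD C (B.getD k 0) _ ht
          have hdsucc : pvDem A B (B.getD k 0) (k + 1) = pvDem A B (B.getD k 0) k + 1 :=
            pvDem_succ_pos A B (B.getD k 0) k heq rfl
          refine ih (k + 1) _ _ (by omega) ?_ ?_ (by rw [List.length_set]; exact hlen) ?_ ?_ res hres
          · intro j hj hmis
            rcases Nat.lt_or_ge j k with hjk | hjk
            · exact hne j hjk hmis
            · have hjeq : j = k := by omega
              subst hjeq
              rw [hdsucc]
              omega
          · intro c
            by_cases hc : c = B.getD k 0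
            · rw [hc, PySem.Dict.get?_insert, if_pos rfl, Option.getD_some, hdsucc]
            · rw [PySem.Dict.get?_insert, if_neg hc, hused c,
                pvDem_succ_neg A B c k (Or.inr (fun h => hc h.symm))]
          · -- sign invariant
            intro ind hind
            by_cases hcc : C.getD ind 0 = B.getD k 0
            · by_cases hici : ind = (pvPosL C (B.getD k 0)).getD
                  ((pvPosL C (B.getD k 0)).length - 1 - pvDem A B (B.getD k 0) k) 0
              · rw [← hici] at hrank
                rw [← hici]
                rw [pvGetD_set_self _ _ _ (by rw [hlen]; exact hind)]
                constructor
                · intro _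
                  rw [hcc, hdsucc]
                  omega
                · intro _
                  omega
              · rw [pvGetD_set_ne _ _ _ _ (fun h => hici h.symm)]
                have hold := hsign ind hind
                have hrne : pvRank C ind ≠ (pvPosL C (B.getD k 0)).length - 1
                    - pvDem A B (B.getD k 0) k := by
                  intro hreq
                  apply hici
                  have hgd := pvPosL_getD_rank C ind hind
                  rw [hcc, hreq] at hgd
                  exact hgd.symm
                rw [hcc] at hold ⊢
                rw [hdsucc]
                rw [hold]
                omega
            · rw [pvDem_succ_neg A B (C.getD ind 0) k (Or.inr (fun h => hcc (h.symm)))]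
              have hne2 : (pvPosL C (B.getD k 0)).getD
                  ((pvPosL C (B.getD k 0)).length - 1 - pvDem A B (B.getD k 0) k) 0 ≠ ind := by
                intro h
                rw [h] at hcol
                exact hcc hcol
              rw [pvGetD_set_ne _ _ _ _ hne2]
              exact hsign ind hind
          · intro ind hind hpos'
            rw [List.length_set] at hind
            by_cases hici : (pvPosL C (B.getD k 0)).getD
                ((pvPosL C (B.getD k 0)).length - 1 - pvDem A B (B.getD k 0) k) 0 = ind
            · rw [hici, pvGetD_set_self _ _ _ hind] at hpos' ⊢
              have hkn : k < A.length := by omega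
              push_cast
              omega
            · rw [pvGetD_set_ne _ _ _ _ hici] at hpos' ⊢
              exact hbound ind hind hpos'

-- ---------- boards / last specs ----------

theorem pvBoards_inv (B : List Int) : ∀ (len k : Nat) (d : PySem.Dict Int Nat),
    (∀ c, d.get? c = ((List.range k).filter (fun j => B.getD j 0 == c)).getLast?) →
    ∀ c, (pvBuildBoards (List.range' k len) B d).get? c
      = ((List.range (k + len)).filter (fun j => B.getD j 0 == c)).getLast? := by
  intro len
  induction len with
  | zero => intro k d hd c; simpa using hd c
  | succ len ih =>
      intro k d hd c
      rw [List.range'_succ]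
      simp only [pvBuildBoards]
      have hnext : ∀ c', (d.insert (B.getD k 0) k).get? c'
          = ((List.range (k + 1)).filter (fun j => B.getD j 0 == c')).getLast? := by
        intro c'
        by_cases hc : c' = B.getD k 0
        · rw [PySem.Dict.get?_insert, if_pos hc, pvFilter_range_succ_pos B c' k hc.symm,
            List.getLast?_concat]
        · rw [PySem.Dict.get?_insert, if_neg hc, hd c',
            pvFilter_range_succ_neg B c' k (fun h => hc h.symm)]
      have h := ih (k + 1) _ hnext c
      rw [show k + (len + 1) = (k + 1) + len by omega]
      exact h

theorem pvBoardsA_spec (B : List Int) (c : Int) :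
    (pvBuildBoards (List.range B.length) B PySem.Dict.empty).get? c = pvLastIdx B c := by
  rw [List.range_eq_range']
  have h := pvBoards_inv B B.length 0 PySem.Dict.empty
    (fun c => by simp [PySem.Dict.get?_empty]) c
  simpa [pvLastIdx] using h

theorem pvLastB_inv (B : List Int) : ∀ (bs : List Int) (k : Nat) (d : PySem.Dict Int Nat),
    bs = B.drop k → k ≤ B.length →
    (∀ c, d.get? c = ((List.range k).filter (fun j => B.getD j 0 == c)).getLast?) →
    ∀ c, (pvLastB bs k d).get? c = pvLastIdx B c := by
  intro bs
  induction bs with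
  | nil =>
      intro k d hcs hk hd c
      have hkl : k = B.length := by
        have := congrArg List.length hcs
        simp at this
        omega
      subst hkl
      simpa [pvLastIdx] using hd c
  | cons b0 rest ih =>
      intro k d hcs hk hd c
      have hklt : k < B.length := by
        have := congrArg List.length hcs
        simp at this
        omega
      have hdrop : B.drop k = B[k] :: B.drop (k + 1) := List.drop_eq_getElem_cons hklt
      rw [hdrop] at hcs
      have hb0 : b0 = B[k] := (List.cons.injEq _ _ _ _ ▸ hcs).1
      have hrest : rest = B.drop (k + 1) := (List.cons.injEq _ _ _ _ ▸ hcs).2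
      have hb0' : b0 = B.getD k 0 := by
        rw [hb0, List.getD_eq_getElem?_getD, List.getElem?_eq_getElem hklt]
        rfl
      simp only [pvLastB]
      refine ih (k + 1) _ (by rw [hrest]) (by omega) ?_ c
      intro c'
      by_cases hc : c' = b0
      · rw [hc, PySem.Dict.get?_insert, if_pos rfl,
          pvFilter_range_succ_pos B b0 k hb0'.symm, List.getLast?_concat]
      · rw [PySem.Dict.get?_insert, if_neg hc, hd c',
          pvFilter_range_succ_neg B c' k (by rw [← hb0']; exact fun h => hc h.symm)]

theorem pvLastB_spec (B : List Int) (c : Int) :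
    (pvLastB B 0 PySem.Dict.empty).get? c = pvLastIdx B c :=
  pvLastB_inv B B 0 PySem.Dict.empty (by simp) (by omega)
    (fun c => by simp [PySem.Dict.get?_empty]) c

theorem pvFilterB_pairwise (B : List Int) (c : Int) :
    ((List.range B.length).filter (fun j => B.getD j 0 == c)).Pairwise (· < ·) :=
  (List.pairwise_lt_range (n := B.length)).filter _

theorem pvPairwise_getLast_le : ∀ (l : List Nat), l.Pairwise (· < ·) → ∀ (j : Nat),
    l.getLast? = some j → ∀ x ∈ l, x ≤ j := by
  intro l
  induction l with
  | nil => intro _ j h; simp at h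
  | cons a t ih =>
      intro hp j hlast x hx
      cases t with
      | nil =>
          simp at hlast hx
          omega
      | cons b t' =>
          have hlast' : (b :: t').getLast? = some j := by
            rwa [List.getLast?_cons_cons] at hlast
          rcases List.mem_cons.mp hx with hxa | hxt
          · subst hxa
            have hjmem : j ∈ b :: t' := List.mem_of_getLast? hlast'
            have := List.rel_of_pairwise_cons hp hjmem
            omega
          · exact ih (List.Pairwise.of_cons hp) j hlast' x hxt

theorem pvLastIdx_some (B : List Int) (c : Int) (j : Nat) (h : pvLastIdx B c = some j) :
    j < B.length ∧ B.getD j 0 = c ∧ ∀ j', j < j' → j' < B.length → B.getD j' 0 ≠ c := by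
  unfold pvLastIdx at h
  have hmem : j ∈ (List.range B.length).filter (fun j => B.getD j 0 == c) :=
    List.mem_of_getLast? h
  have hj : j < B.length ∧ B.getD j 0 = c := by
    have := List.mem_filter.mp hmem
    refine ⟨List.mem_range.mp this.1, by simpa using this.2⟩
  refine ⟨hj.1, hj.2, ?_⟩
  intro j' hjj' hj'B hc
  have hmem' : j' ∈ (List.range B.length).filter (fun j => B.getD j 0 == c) := by
    rw [List.mem_filter]
    exact ⟨List.mem_range.mpr hj'B, by simpa using hc⟩
  have hle := pvPairwise_getLast_le _ (pvFilterB_pairwise B c) j h j' hmem'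
  omega

theorem pvLastIdx_none (B : List Int) (c : Int) (h : ∀ j', j' < B.length → B.getD j' 0 ≠ c) :
    pvLastIdx B c = none := by
  unfold pvLastIdx
  have hnil : (List.range B.length).filter (fun j => B.getD j 0 == c) = [] := by
    rw [List.filter_eq_nil_iff]
    intro a ha
    simpa using h a (List.mem_range.mp ha)
  rw [hnil]
  rfl

-- ---------- anchors characterisation ----------

theorem pvAnchors_getD : ∀ (rs cs : List Int) (last : PySem.Dict Int Nat) (ind : Nat),
    ind < rs.length → ind < cs.length →
    (pvAnchorsB (rs.zip cs) last).getD ind none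
      = (if 0 < rs.getD ind 0 then some (rs.getD ind 0 - 1)
         else (last.get? (cs.getD ind 0)).map (fun j => ((j : Nat) : Int))) := by
  intro rs
  induction rs with
  | nil => intro cs last ind h _; simp at h
  | cons r rs' ih =>
      intro cs last ind hr hc
      cases cs with
      | nil => simp at hc
      | cons c cs' =>
          cases ind with
          | zero =>
              simp only [List.zip_cons_cons, pvAnchorsB]
              cases hget : last.get? c <;> simp [hget]
          | succ ind' =>
              simp only [List.zip_cons_cons, pvAnchorsB]
              have h := ih cs' last ind' (by simpa using hr) (by simpa using hc)
              simpa using h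

-- ---------- first-True bookkeeping ----------

theorem pvFindFirstTrue_replicate (n : Nat) : pvFindFirstTrue (List.replicate n false) = none := by
  induction n with
  | zero => rfl
  | succ n ih => simp [List.replicate_succ, pvFindFirstTrue, ih]

theorem pvFindFirstTrue_set : ∀ (l : List Bool) (j : Nat), j < l.length →
    pvFindFirstTrue (l.set j true) = pvMinUpd (pvFindFirstTrue l) j := by
  intro l
  induction l with
  | nil => intro j h; simp at h
  | cons b rest ih =>
      intro j hj
      cases j with
      | zero =>
          simp only [List.set_cons_zero, pvFindFirstTrue, if_true]
          by_cases hb : b = true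
          · simp [hb, pvMinUpd]
          · simp only [hb, pvMinUpd]
            cases h : pvFindFirstTrue rest <;> simp
      | succ j' =>
          have hj' : j' < rest.length := by simp only [List.length_cons] at hj; omega
          simp only [List.set_cons_succ, pvFindFirstTrue]
          by_cases hb : b = true
          · simp [hb, pvMinUpd]
          · rw [if_neg hb, if_neg hb, ih j' hj']
            cases h : pvFindFirstTrue rest with
            | none => simp [pvMinUpd]
            | some k =>
                simp only [pvMinUpd, Option.map_some]
                by_cases hlt : j' < k
                · rw [if_pos hlt, if_pos (by omega), Option.map_some]
                · rw [if_neg hlt, if_neg (by omega), Option.map_some]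

theorem pvMinUpd_cast (mp : Option Nat) (j : Nat) :
    (match mp.map (fun x => ((x : Nat) : Int)) with
     | none => some ((j : Nat) : Int)
     | some v => if ((j : Nat) : Int) < v then some ((j : Nat) : Int) else some v)
    = (pvMinUpd mp j).map (fun x => ((x : Nat) : Int)) := by
  cases mp with
  | none => rfl
  | some v =>
      simp only [Option.map_some, pvMinUpd]
      by_cases h : j < v
      · rw [if_pos (by exact_mod_cast h), if_pos h, Option.map_some]
      · rw [if_neg (by exact_mod_cast h), if_neg h, Option.map_some]

-- ---------- phase 2: descending scan vs anchors + running minimum ----------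

theorem pvFill_eq (A B C : List Int) (boards : PySem.Dict Int Nat) (res0 : List Int)
    (anchors : List (Option Int))
    (hlen : res0.length = C.length)
    (hboards : ∀ c, boards.get? c = pvLastIdx B c)
    (hanch : ∀ ind, ind < C.length →
      anchors.getD ind none
        = (if 0 < res0.getD ind 0 then some (res0.getD ind 0 - 1)
           else (boards.get? (C.getD ind 0)).map (fun j => ((j : Nat) : Int))))
    (hsign : pvSignOK A B C res0 A.length)
    (hbound : pvBoundOK A res0)
    (hnobad : ∀ ind, ind < C.length → ¬ pvBad A B C ind) :
    ∀ (k : Nat) (out : List Int) (painted : List Bool),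
    k ≤ C.length →
    painted.length = A.length →
    pvRepaintLoopA ((List.range k).reverse) C boards (res0.take k ++ out) painted
      = pvFillB ((List.range k).reverse) anchors res0 out
          ((pvFindFirstTrue painted).map (fun x => ((x : Nat) : Int))) := by
  intro k
  induction k with
  | zero =>
      intro out painted _ _
      simp [pvRepaintLoopA, pvFillB]
  | succ k ih =>
      intro out painted hk hplen
      have hrev : (List.range (k + 1)).reverse = k :: (List.range k).reverse := by
        rw [List.range_succ, List.reverse_append]
        rfl
      rw [hrev]
      have hgd : (res0.take (k + 1) ++ out).getD k 0 = res0.getD k 0 :=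
        pvGetD_take_append res0 out (k + 1) k (by omega) (by omega)
      have hanck := hanch k (by omega)
      by_cases hr : 0 < res0.getD k 0
      · -- anchored by phase 1
        have hjne : res0.getD k 0 ≤ (A.length : Int) :=
          hbound k (by omega) hr
        have hjlt : (res0.getD k 0 - 1).toNat < painted.length := by
          rw [hplen]; omega
        have hrepr : res0.take (k + 1) ++ out = res0.take k ++ (res0.getD k 0 :: out) := by
          rw [pvTake_succ_concat res0 k (by omega), List.append_assoc]
          rfl
        have hcast : ((res0.getD k 0 - 1).toNat : Int) = res0.getD k 0 - 1 :=
          Int.toNat_of_nonneg (by omega)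
        have hmp : (match (pvFindFirstTrue painted).map (fun x => ((x : Nat) : Int)) with
            | none => some (res0.getD k 0 - 1)
            | some v => if (res0.getD k 0 - 1) < v then some (res0.getD k 0 - 1) else some v)
            = (pvFindFirstTrue (painted.set (res0.getD k 0 - 1).toNat true)).map
                (fun x => ((x : Nat) : Int)) := by
          rw [pvFindFirstTrue_set painted _ hjlt]
          have h := pvMinUpd_cast (pvFindFirstTrue painted) (res0.getD k 0 - 1).toNat
          rw [hcast] at h
          exact h
        simp only [pvRepaintLoopA, pvFillB]
        rw [hgd, if_pos hr, hanck, if_pos hr]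
        dsimp only
        rw [if_pos hr, hmp, hrepr]
        exact ih (res0.getD k 0 :: out) (painted.set (res0.getD k 0 - 1).toNat true)
          (by omega) (by rw [List.length_set]; exact hplen)
      · -- not anchored by phase 1
        have hnUsed : ¬ ((pvPosL C (C.getD k 0)).length
            - pvDem A B (C.getD k 0) A.length ≤ pvRank C k) := by
          intro hused
          exact hr ((hsign k (by omega)).mpr hused)
        cases hb : boards.get? (C.getD k 0) with
        | some j =>
            obtain ⟨hjB, hjc, hjmax⟩ := pvLastIdx_some B (C.getD k 0) j (by rw [← hboards]; exact hb)
            have hjn : j < A.length := by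
              by_contra hge
              push_neg at hge
              refine hnobad k (by omega) ⟨hnUsed, ?_⟩
              refine ⟨j, List.mem_range.mpr hjB, hge, hjc, ?_⟩
              intro j' hj' hlt'
              exact hjmax j' hlt' (List.mem_range.mp hj')
            have hrepr : (res0.take (k + 1) ++ out).set k (((j : Nat) : Int) + 1)
                = res0.take k ++ (((j : Nat) : Int) + 1) :: out :=
              pvSet_boundary res0 out k _ (by omega)
            simp only [pvRepaintLoopA, pvFillB]
            rw [hgd, if_neg hr, hb, hanck, if_neg hr, hb]
            simp only [Option.map_some]
            rw [if_neg hr, pvMinUpd_cast,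
              ← pvFindFirstTrue_set painted j (by rw [hplen]; exact hjn), hrepr]
            exact ih ((((j : Nat) : Int) + 1) :: out) (painted.set j true)
              (by omega) (by rw [List.length_set]; exact hplen)
        | none =>
            simp only [pvRepaintLoopA, pvFillB]
            rw [hgd, if_neg hr, hb, hanck, if_neg hr, hb]
            simp only [Option.map_none]
            cases hf : pvFindFirstTrue painted with
            | some jf =>
                simp only [Option.map_some]
                have hrepr : (res0.take (k + 1) ++ out).set k (((jf : Nat) : Int) + 1)
                    = res0.take k ++ (((jf : Nat) : Int) + 1) :: out :=
                  pvSet_boundary res0 out k _ (by omega)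
                rw [hrepr]
                have h2 := ih ((((jf : Nat) : Int) + 1) :: out) painted (by omega) hplen
                rw [hf] at h2
                exact h2
            | none =>
                simp only [Option.map_none]
                have hrepr : (res0.take (k + 1) ++ out).set k (-1)
                    = res0.take k ++ (-1 : Int) :: out :=
                  pvSet_boundary res0 out k _ (by omega)
                rw [hrepr, List.append_assoc]
                rfl

-- ---------- Pre_ bridges ----------

theorem pvNoEarly_not_early (A B C : List Int) (h : pvNoEarly A B C A.length) :
    ¬ pvEarly A B C := by
  intro ⟨i, hi, hmis, hlt⟩
  have hiA : i < A.length := by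
    have := List.mem_range.mp hi
    omega
  have := h i hiA hmis
  omega

-- ---------- main assembly ----------

-- ===== VERDICT (by name: the statement is the Claim_ definition above) =====
theorem get_painting_spec : Claim_equal_get_painting := by
  intro A B C _ hpre
  unfold Spec_get_painting
  have hposD : ∀ c, ((pvPosB C 0 PySem.Dict.empty).get? c).getD [] = pvPosL C c := pvPosB_getD C
  have hloops := pvLoops_eq A B C (List.range A.length)
    (pvBuildPaintersA (List.range C.length) C PySem.Dict.empty)
    (pvPosB C 0 PySem.Dict.empty) PySem.Dict.empty (List.replicate C.length (-1))
    hposD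
    (fun c => by
      rw [PySem.Dict.get?_empty]
      simp)
    (fun c => by
      rw [pvBuildA_spec C c, PySem.Dict.get?_empty]
      simp)
  show get_painting A B C = get_painting_alt A B C
  show (match pvPaintLoopA (List.range A.length) A B
        (pvBuildPaintersA (List.range C.length) C PySem.Dict.empty)
        (List.replicate C.length (-1)) with
      | (result, true) => result
      | (result, false) =>
          pvRepaintLoopA (List.range C.length).reverse C
            (pvBuildBoards (List.range B.length) B PySem.Dict.empty) result
            (List.replicate A.length false))
    = (match pvAssignB (List.range A.length) A B (pvPosB C 0 PySem.Dict.empty)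
          PySem.Dict.empty (List.replicate C.length (-1)) with
      | (result, true) => result
      | (result, false) =>
          pvFillB (List.range C.length).reverse
            (pvAnchorsB (result.zip C) (pvLastB B 0 PySem.Dict.empty)) result [] none)
  rw [hloops]
  cases hp : pvAssignB (List.range A.length) A B (pvPosB C 0 PySem.Dict.empty)
      PySem.Dict.empty (List.replicate C.length (-1)) with
  | mk res flag =>
    cases flag with
    | true => rfl
    | false =>
      obtain ⟨hNE, hreslen, hsignN, hboundN⟩ :=
        pvAssign_master A B C (pvPosB C 0 PySem.Dict.empty) hposD A.length 0
          PySem.Dict.empty (List.replicate C.length (-1)) (by omega)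
          (fun j hj => absurd hj (by omega))
          (fun c => by
            rw [PySem.Dict.get?_empty]
            simp [pvDem])
          (by simp)
          (by
            intro ind hind
            have hrk := pvRank_lt C ind hind
            constructor
            · intro h0
              rw [List.getD_eq_getElem?_getD, List.getElem?_replicate, if_pos hind] at h0
              simp at h0
            · intro hge
              exfalso
              have hd0 : pvDem A B (C.getD ind 0) 0 = 0 := rfl
              omega)
          (by
            intro ind hind h0
            rw [List.getD_eq_getElem?_getD, List.getElem?_replicate,
              if_pos (by simpa using hind)] at h0
            simp at h0)
          res (by rw [← List.range_eq_range']; exact hp)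
      show pvRepaintLoopA (List.range C.length).reverse C
          (pvBuildBoards (List.range B.length) B PySem.Dict.empty) res
          (List.replicate A.length false)
        = pvFillB (List.range C.length).reverse
            (pvAnchorsB (res.zip C) (pvLastB B 0 PySem.Dict.empty)) res [] none
      have hboards : ∀ c, (pvBuildBoards (List.range B.length) B PySem.Dict.empty).get? c
          = pvLastIdx B c := pvBoardsA_spec B
      have hanch : ∀ ind, ind < C.length →
          (pvAnchorsB (res.zip C) (pvLastB B 0 PySem.Dict.empty)).getD ind none
            = (if 0 < res.getD ind 0 then some (res.getD ind 0 - 1)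
               else ((pvBuildBoards (List.range B.length) B PySem.Dict.empty).get?
                 (C.getD ind 0)).map (fun j => ((j : Nat) : Int))) := by
        intro ind hind
        rw [pvAnchors_getD res C _ ind (by rw [hreslen]; exact hind) hind]
        rw [pvLastB_spec, pvBoardsA_spec]
      have hnotEarly : ¬ pvEarly A B C := pvNoEarly_not_early A B C hNE
      by_cases hC : C = []
      · subst hC
        simp only [List.length_nil, List.range_zero, List.reverse_nil, pvRepaintLoopA, pvFillB]
        exact List.length_eq_zero_iff.mp (by rw [hreslen]; rfl)
      · by_cases hbadall : ∀ ind, ind < C.length → ¬ pvBad A B C ind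
        · have h := pvFill_eq A B C _ res _ hreslen hboards hanch hsignN hboundN hbadall
            C.length [] (List.replicate A.length false) (le_refl _) (by simp)
          rw [pvFindFirstTrue_replicate] at h
          have htak : res.take C.length = res := by
            rw [← hreslen]
            exact List.take_length
          rw [htak, List.append_nil] at h
          simpa using h
        · push_neg at hbadall
          obtain ⟨ind0, hind0, hbad0⟩ := hbadall
          have hnb : A.length ≤ B.length := by
            by_contra hgt
            push_neg at hgt
            exact hpre (Or.inl ⟨hgt, hnotEarly⟩)
          have hnotTop : ¬ (pvUsedP A B C (C.length - 1) ∨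
              ∃ j ∈ List.range B.length, B.getD j 0 = C.getD (C.length - 1) 0) := by
            intro htop
            exact hpre (Or.inr (Or.inr ⟨hnb, hnotEarly, hC, htop,
              ind0, List.mem_range.mpr hind0, hbad0⟩))
          push_neg at hnotTop
          obtain ⟨hnotUsed, hnoB⟩ := hnotTop
          have hm0 : 0 < C.length := List.length_pos_of_ne_nil hC
          have hm1 : C.length - 1 < C.length := by omega
          have hrev : (List.range C.length).reverse
              = (C.length - 1) :: (List.range (C.length - 1)).reverse := by
            conv_lhs => rw [show C.length = (C.length - 1) + 1 by omega]
            rw [List.range_succ, List.reverse_append]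
            rfl
          have hr0 : ¬ 0 < res.getD (C.length - 1) 0 := by
            intro h0
            exact hnotUsed ((hsignN (C.length - 1) hm1).mp h0)
          have hbnone : (pvBuildBoards (List.range B.length) B PySem.Dict.empty).get?
              (C.getD (C.length - 1) 0) = none := by
            rw [pvBoardsA_spec]
            exact pvLastIdx_none B _ (fun j hj => hnoB j (List.mem_range.mpr hj))
          rw [hrev]
          simp only [pvRepaintLoopA, pvFillB]
          rw [hanch (C.length - 1) hm1, hbnone, if_neg hr0, if_neg hr0]
          simp only [Option.map_none]
          rw [pvFindFirstTrue_replicate]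
          have hset : res.set (C.length - 1) (-1) = res.take (C.length - 1) ++ (-1 : Int) :: [] := by
            have h2 := pvSet_boundary res [] (C.length - 1) (-1) (by rw [hreslen]; omega)
            rw [show C.length - 1 + 1 = C.length by omega] at h2
            have htak : res.take C.length = res := by
              rw [← hreslen]
              exact List.take_length
            rw [htak, List.append_nil] at h2
            exact h2
          rw [hset]
          simp
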